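-- pv_equiv track=rewrite | github.com/Ka-raS/School-Code | Năm 2 Kỳ 2 - Lập trình Python/139. CHẴN – LẺ - NGUYÊN TỐ.py | is_valid_or_whatever_idk
-- ===== SOURCE A (Python) =====
-- import typing
--
-- def is_valid_or_whatever_idk(sequence: str, is_prime: typing.List[bool]) -> bool:
--     sum_digit = 0
--     for i, digit in enumerate(sequence):
--         value = ord(digit) - 48
--         if i & 1 != value & 1:
--             return False
--         sum_digit += value
--     return is_prime[sum_digit]
-- ===== SOURCE B (Python) =====
-- def is_valid_or_whatever_idk(sequence, is_prime):
--     # strided-slice validation: characters at even positions must have even codes,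
--     # those at odd positions odd codes; digit sum computed as total code sum - 48*len
--     if any(ord(c) & 1 for c in sequence[::2]) or not all(ord(c) & 1 for c in sequence[1::2]):
--         return False
--     return is_prime[sum(map(ord, sequence)) - 48 * len(sequence)]
-- ===== Notes on version B (the rewrite author's own statement) =====
-- stated objective: alternative
-- what changed: Replaces A's indexed fused loop (per-character index-parity test interleaved with sum accumulation and early return) by an index-free formulation on the strided slices sequence[::2] and sequence[1::2] (even slice all even codes, odd slice all odd codes) and computes the table index algebraically as sum(map(ord, sequence)) - 48*len(sequence).
import Mathlib
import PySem

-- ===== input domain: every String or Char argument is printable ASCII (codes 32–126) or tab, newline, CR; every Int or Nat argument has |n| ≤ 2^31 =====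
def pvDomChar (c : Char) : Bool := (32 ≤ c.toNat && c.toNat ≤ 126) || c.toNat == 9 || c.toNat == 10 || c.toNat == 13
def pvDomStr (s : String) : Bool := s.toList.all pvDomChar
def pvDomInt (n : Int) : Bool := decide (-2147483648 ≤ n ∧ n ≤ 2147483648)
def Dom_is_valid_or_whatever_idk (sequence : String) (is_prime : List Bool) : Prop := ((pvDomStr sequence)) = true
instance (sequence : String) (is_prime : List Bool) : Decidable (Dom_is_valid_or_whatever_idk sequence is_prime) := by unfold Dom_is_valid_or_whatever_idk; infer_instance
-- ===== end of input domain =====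

-- B replaces A's indexed fused loop by an index-free check on the strided slices
-- sequence[::2] / sequence[1::2] plus an algebraic digit sum; same cost, different structure.

-- ===== PORT A =====
-- the fused for-loop of A: early return False on parity mismatch, else accumulate sum;
-- after the loop, is_prime[sum_digit] (pyGet?; total via getD, Pre_ excludes the IndexError inputs)
def pvLoopA (is_prime : List Bool) : List (Int × Char) → Int → Bool
  | [], sum_digit => (PySem.List.pyGet? is_prime sum_digit).getD false
  | (i, d) :: rest, sum_digit =>
    let value : Int := (d.toNat : Int) - 48
    if i % 2 ≠ value % 2 then false
    else pvLoopA is_prime rest (sum_digit + value)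

def is_valid_or_whatever_idk (sequence : String) (is_prime : List Bool) : Bool :=
  pvLoopA is_prime (PySem.List.enumerate sequence.toList) 0

-- ===== PORT B =====
-- step 2 ≠ 0, so slice? returns `some`; getD [] just removes the Option
def is_valid_or_whatever_idk_alt (sequence : String) (is_prime : List Bool) : Bool :=
  let cs := sequence.toList
  if ((PySem.List.slice? cs none none 2).getD []).any (fun c => c.toNat % 2 == 1)
      || !(((PySem.List.slice? cs (some 1) none 2).getD []).all (fun c => c.toNat % 2 == 1)) then
    false
  else
    (PySem.List.pyGet? is_prime ((cs.map (fun c => (c.toNat : Int))).sum - 48 * cs.length)).getD false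

-- ===== PRECONDITION & SPEC =====
def pvDigitSum (sequence : String) : Int :=
  (sequence.toList.map (fun d => (d.toNat : Int) - 48)).sum

-- Pre_ excludes exactly the inputs where A raises IndexError: the parity check passes on
-- every position but the digit sum is not a valid Python index into is_prime.
def Pre_is_valid_or_whatever_idk (sequence : String) (is_prime : List Bool) : Prop :=
  (∃ q ∈ PySem.List.enumerate sequence.toList, (q.1 + (q.2.toNat : Int)) % 2 ≠ 0) ∨
    PySem.Raise.InRange is_prime.length (pvDigitSum sequence)
instance (sequence : String) (is_prime : List Bool) : Decidable (Pre_is_valid_or_whatever_idk sequence is_prime) := by unfold Pre_is_valid_or_whatever_idk; infer_instance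

def pvWitness_is_valid_or_whatever_idk : String × List Bool :=
  ("23", [false, false, true, true, false, true])

def Spec_is_valid_or_whatever_idk (sequence : String) (is_prime : List Bool) (out : Bool) : Prop := out = is_valid_or_whatever_idk_alt sequence is_prime
instance (sequence : String) (is_prime : List Bool) (out : Bool) : Decidable (Spec_is_valid_or_whatever_idk sequence is_prime out) := by unfold Spec_is_valid_or_whatever_idk; infer_instance

-- ===== CLAIM (what is proved, stated in full; the proofs are below) =====
def Claim_equal_is_valid_or_whatever_idk : Prop := ∀ (sequence : String) (is_prime : List Bool), Dom_is_valid_or_whatever_idk sequence is_prime → Pre_is_valid_or_whatever_idk sequence is_prime → Spec_is_valid_or_whatever_idk sequence is_prime (is_valid_or_whatever_idk sequence is_prime)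

-- ===== LEMMAS AND PROOFS =====

-- every other element, starting at the head: what sequence[::2] selects
def pvEO {α : Type} : List α → List α
  | [] => []
  | [a] => [a]
  | a :: _ :: t => a :: pvEO t

theorem pvEO_eq {α : Type} (xs : List α) :
    (List.range ((xs.length + 1) / 2)).filterMap (fun k => xs[2*k]?) = pvEO xs := by
  match xs with
  | [] => simp [pvEO]
  | [a] => simp [pvEO, List.range_succ]
  | a :: b :: t =>
    have h : (((a :: b :: t).length + 1) / 2) = (t.length + 1) / 2 + 1 := by
      simp; omega
    rw [h, List.range_succ_eq_map, List.filterMap_cons, List.filterMap_map]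
    have h2 : ((fun k => (a :: b :: t)[2*k]?) ∘ (· + 1)) = fun k => t[2*k]? := by
      funext k
      show (a :: b :: t)[2*(k+1)]? = t[2*k]?
      have e : 2*(k+1) = (2*k)+1+1 := by omega
      simp [e]
    rw [h2, pvEO_eq t]
    simp [pvEO]

theorem pvEO_tail_eq {α : Type} (xs : List α) :
    (List.range (xs.length / 2)).filterMap (fun k => xs[1+2*k]?) = pvEO xs.tail := by
  match xs with
  | [] => simp [pvEO]
  | [a] => simp [pvEO]
  | a :: b :: t =>
    have h : ((a :: b :: t).length / 2) = t.length / 2 + 1 := by simp; omega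
    rw [h, List.range_succ_eq_map, List.filterMap_cons, List.filterMap_map]
    have h2 : ((fun k => (a :: b :: t)[1+2*k]?) ∘ (· + 1)) = fun k => t[1+2*k]? := by
      funext k
      show (a :: b :: t)[1+2*(k+1)]? = t[1+2*k]?
      have e : 1+2*(k+1) = (1+2*k)+1+1 := by omega
      simp [e]
    rw [h2, pvEO_tail_eq t]
    cases t <;> simp [pvEO]

-- xs[::2] is pvEO xs
theorem pvSlice2 {α : Type} (xs : List α) :
    PySem.List.slice? xs none none 2 = some (pvEO xs) := by
  rw [← pvEO_eq]
  simp only [PySem.List.slice?, PySem.List.sliceIndices]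
  norm_num
  have hc : (if 0 < xs.length then (((xs.length:Int) + 2 - 1) / 2).toNat else 0) = (xs.length + 1) / 2 := by
    split <;> omega
  rw [hc]
  apply List.filterMap_congr
  intro k _
  have : ((2:Int) * ↑k).toNat = 2 * k := by omega
  rw [this]

-- xs[1::2] is pvEO xs.tail
theorem pvSlice12 {α : Type} (xs : List α) :
    PySem.List.slice? xs (some 1) none 2 = some (pvEO xs.tail) := by
  rw [← pvEO_tail_eq]
  simp only [PySem.List.slice?, PySem.List.sliceIndices]
  norm_num
  by_cases hx : xs = []
  · subst hx; simp
  · have hlen : 1 ≤ xs.length := by cases xs with | nil => exact absurd rfl hx | cons a t => simp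
    have h1 : (min (1:Int) (xs.length:Int)) = 1 := by omega
    rw [h1]
    have hc : (if 1 < xs.length then (((xs.length:Int) - 1 + 2 - 1) / 2).toNat else 0) = xs.length / 2 := by
      split <;> omega
    rw [hc]
    apply List.filterMap_congr
    intro k _
    have : ((1:Int) + 2 * ↑k).toNat = 1 + 2 * k := by omega
    rw [this]

-- sum of (ord - 48) equals sum of ords minus 48 * length
theorem pvSumShift (cs : List Char) :
    (cs.map (fun d => (d.toNat : Int) - 48)).sum
      = (cs.map (fun c => (c.toNat : Int))).sum - 48 * cs.length := by
  induction cs with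
  | nil => simp
  | cons c t ih => simp [ih]; ring

-- A's mismatch test over enumerate equals B's slice conditions (for an even start index)
theorem pvParity (cs : List Char) : ∀ (i : Int), i % 2 = 0 →
    ((PySem.List.enumerate cs i).any (fun q => decide ((q.1 + (q.2.toNat : Int)) % 2 ≠ 0)))
      = ((pvEO cs).any (fun c => c.toNat % 2 == 1)
          || !((pvEO cs.tail).all (fun c => c.toNat % 2 == 1))) := by
  match cs with
  | [] => intro i h; simp [PySem.List.enumerate_nil, pvEO]
  | [a] =>
    intro i h
    simp only [PySem.List.enumerate_cons, PySem.List.enumerate_nil, List.any_cons,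
      List.any_nil, pvEO, List.all_nil, List.tail_cons, Bool.not_true, Bool.or_false]
    rw [Bool.eq_iff_iff]; simp; omega
  | a :: b :: t =>
    intro i h
    rw [PySem.List.enumerate_cons, PySem.List.enumerate_cons]
    simp only [List.any_cons]
    rw [pvParity t (i + 1 + 1) (by omega)]
    have hd1 : (decide ((i + (a.toNat : Int)) % 2 ≠ 0)) = (a.toNat % 2 == 1) := by
      rw [Bool.eq_iff_iff]; simp; omega
    have hd2 : (decide ((i + 1 + (b.toNat : Int)) % 2 ≠ 0)) = !(b.toNat % 2 == 1) := by
      rw [Bool.eq_iff_iff]; simp; omega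
    rw [hd1, hd2]
    show _ = ((pvEO (a :: b :: t)).any _ || !((pvEO (b :: t)).all _))
    have hbt : pvEO (b :: t) = b :: pvEO t.tail := by
      cases t <;> simp [pvEO]
    rw [hbt]
    simp only [pvEO, List.any_cons, List.all_cons]
    cases (a.toNat % 2 == 1) <;> cases (b.toNat % 2 == 1) <;>
      cases ((pvEO t).any (fun c => c.toNat % 2 == 1)) <;>
      cases ((pvEO t.tail).all (fun c => c.toNat % 2 == 1)) <;> simp

-- the fused loop equals: any-mismatch test, else lookup at (accumulator + remaining digit sum)
theorem pvLoopA_eq (is_prime : List Bool) (cs : List Char) :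
    ∀ (i : Int) (acc : Int),
      pvLoopA is_prime (PySem.List.enumerate cs i) acc =
        if (PySem.List.enumerate cs i).any (fun q => (q.1 + (q.2.toNat : Int)) % 2 ≠ 0) then false
        else (PySem.List.pyGet? is_prime
                (acc + (cs.map (fun d => (d.toNat : Int) - 48)).sum)).getD false := by
  induction cs with
  | nil => intro i acc; simp [PySem.List.enumerate_nil, pvLoopA]
  | cons c cs ih =>
    intro i acc
    rw [PySem.List.enumerate_cons]
    simp only [pvLoopA, List.any_cons, List.map_cons, List.sum_cons]
    have hpar : (i % 2 ≠ ((c.toNat : Int) - 48) % 2) ↔ ((i + (c.toNat : Int)) % 2 ≠ 0) := by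
      omega
    by_cases h : i % 2 ≠ ((c.toNat : Int) - 48) % 2
    · simp [h, hpar.mp h]
    · have h' : ¬ ((i + (c.toNat : Int)) % 2 ≠ 0) := fun hc => h (hpar.mpr hc)
      simp only [if_neg h, ih (i + 1) (acc + ((c.toNat : Int) - 48))]
      have : acc + ((c.toNat : Int) - 48) + (cs.map (fun d => (d.toNat : Int) - 48)).sum
           = acc + (((c.toNat : Int) - 48) + (cs.map (fun d => (d.toNat : Int) - 48)).sum) := by ring
      have hz : (i + (c.toNat : Int)) % 2 = 0 := by omega
      simp [hz, this]

-- ===== VERDICT (by name: the statement is the Claim_ definition above) =====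
theorem is_valid_or_whatever_idk_spec : Claim_equal_is_valid_or_whatever_idk := by
  intro sequence is_prime _ _
  unfold Spec_is_valid_or_whatever_idk is_valid_or_whatever_idk is_valid_or_whatever_idk_alt
  rw [pvLoopA_eq]
  simp only [pvSlice2, pvSlice12, Option.getD_some]
  rw [← pvParity sequence.toList 0 (by decide)]
  rw [pvSumShift]
  simp
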